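-- pv_equiv track=rewrite | github.com/blueOctopusAI/PorkChop | src/porkchop/comparator.py | _match_sections
-- ===== SOURCE A (Python) =====
-- from typing import Optional
--
-- def _match_sections(
--     sections_a: dict[str, str], sections_b: dict[str, str]
-- ) -> dict[str, tuple[Optional[str], Optional[str]]]:
--     """Match sections between two versions by heading."""
--     all_headings = list(dict.fromkeys(list(sections_a.keys()) + list(sections_b.keys())))
--     return {
--         heading: (sections_a.get(heading), sections_b.get(heading))
--         for heading in all_headings
--     }
-- ===== SOURCE B (Python) =====
-- from typing import Optional
--
-- def _match_sections(
--     sections_a: dict[str, str], sections_b: dict[str, str]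
-- ) -> dict[str, tuple[Optional[str], Optional[str]]]:
--     """Match sections between two versions by heading."""
--     # Merge-by-overwrite: no lookups into the input dicts; stream a's items as
--     # partial tuples, then stream b's items patching the second slot in place.
--     result: dict[str, tuple[Optional[str], Optional[str]]] = {}
--     for heading, va in sections_a.items():
--         result[heading] = (va, None)
--     for heading, vb in sections_b.items():
--         if heading in result:
--             result[heading] = (result[heading][0], vb)
--         else:
--             result[heading] = (None, vb)
--     return result
-- ===== Notes on version B (the rewrite author's own statement) =====
-- stated objective: alternative
-- what changed: B never looks a heading up in either input dict: instead of A's deduplicated merged key list with two .get lookups per key, B streams a's items inserting partial tuples (va, None) and then streams b's items patching the second slot of an existing entry in place (dict overwrite keeps position) or appending (None, vb).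
import Mathlib
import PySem

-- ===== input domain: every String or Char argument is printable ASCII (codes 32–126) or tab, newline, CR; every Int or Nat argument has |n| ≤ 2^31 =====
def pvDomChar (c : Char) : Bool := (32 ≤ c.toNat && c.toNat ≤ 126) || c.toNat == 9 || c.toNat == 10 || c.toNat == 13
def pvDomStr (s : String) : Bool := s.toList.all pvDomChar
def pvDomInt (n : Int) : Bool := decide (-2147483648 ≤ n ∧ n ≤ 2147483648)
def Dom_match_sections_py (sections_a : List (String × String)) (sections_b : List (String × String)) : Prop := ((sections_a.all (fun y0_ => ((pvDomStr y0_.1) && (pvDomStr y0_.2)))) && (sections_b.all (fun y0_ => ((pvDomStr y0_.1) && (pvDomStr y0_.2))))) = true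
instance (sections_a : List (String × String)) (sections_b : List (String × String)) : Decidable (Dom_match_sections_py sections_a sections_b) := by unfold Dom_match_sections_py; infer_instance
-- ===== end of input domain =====

set_option maxRecDepth 8192

-- B is a merge-by-overwrite alternative: it never looks a heading up in either input dict,
-- streaming a's items as partial tuples (va, None) and patching the second slot while
-- streaming b's items; same cost as A, different mechanism.

-- ===== PORT A =====
def match_sections_py (sections_a : List (String × String)) (sections_b : List (String × String)) : List (String × Option String × Option String) :=
  let allHeadings := PySem.List.dedup (sections_a.map Prod.fst ++ sections_b.map Prod.fst)
  allHeadings.map (fun heading =>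
    (heading, (PySem.Dict.mk sections_a).get? heading, (PySem.Dict.mk sections_b).get? heading))

-- ===== PORT B =====
def match_sections_py_alt (sections_a : List (String × String)) (sections_b : List (String × String)) : List (String × Option String × Option String) :=
  let result : PySem.Dict String (Option String × Option String) :=
    sections_a.foldl
      (fun result p => result.insert p.1 ((some p.2 : Option String), (none : Option String)))
      PySem.Dict.empty
  let result :=
    sections_b.foldl
      (fun result p =>
        if result.contains p.1 then
          -- result[h] = (result[h][0], vb): overwrite keeps position; the getD default is never used
          result.insert p.1 (((result.get? p.1).getD (none, none)).1, some p.2)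
        else
          result.insert p.1 ((none : Option String), some p.2))
      result
  result.items

-- ===== PRECONDITION & SPEC =====
-- Pre_ excludes association lists with duplicate keys: the Python arguments are dicts, which
-- cannot carry duplicate keys, so such lists do not represent any Python input faithfully.
def Pre_match_sections_py (sections_a : List (String × String)) (sections_b : List (String × String)) : Prop :=
  (sections_a.map Prod.fst).Nodup ∧ (sections_b.map Prod.fst).Nodup
instance (sections_a : List (String × String)) (sections_b : List (String × String)) : Decidable (Pre_match_sections_py sections_a sections_b) := by unfold Pre_match_sections_py; infer_instance
def pvWitness_match_sections_py : (List (String × String)) × (List (String × String)) :=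
  ([("Intro", "aa"), ("Body", "bb")], [("Body", "cc"), ("End", "dd")])

def Spec_match_sections_py (sections_a : List (String × String)) (sections_b : List (String × String)) (out : List (String × Option String × Option String)) : Prop := out = match_sections_py_alt sections_a sections_b
instance (sections_a : List (String × String)) (sections_b : List (String × String)) (out : List (String × Option String × Option String)) : Decidable (Spec_match_sections_py sections_a sections_b out) := by unfold Spec_match_sections_py; infer_instance

-- ===== CLAIM (what is proved, stated in full; the proofs are below) =====
def Claim_equal_match_sections_py : Prop := ∀ (sections_a : List (String × String)) (sections_b : List (String × String)), Dom_match_sections_py sections_a sections_b → Pre_match_sections_py sections_a sections_b → Spec_match_sections_py sections_a sections_b (match_sections_py sections_a sections_b)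

-- ===== LEMMAS AND PROOFS =====

-- the first (hence, under Nodup, the only) value stored under key k in an association list
def pvFindV (b : List (String × String)) (k : String) : Option String :=
  (b.find? (fun p => p.1 == k)).map Prod.snd

-- what B's second pass does to one already-present entry
def pvUpd (b : List (String × String)) (q : String × Option String × Option String) :
    String × Option String × Option String :=
  (q.1, q.2.1, match pvFindV b q.1 with | some v => some v | none => q.2.2)

theorem pvFindV_cons (p : String × String) (rest : List (String × String)) (k : String) :
    pvFindV (p :: rest) k = if p.1 == k then some p.2 else pvFindV rest k := by
  simp only [pvFindV, List.find?_cons]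
  by_cases h : (p.1 == k) = true <;> simp [h]

theorem pvFindV_eq_none_of_not_mem (b : List (String × String)) (k : String)
    (h : k ∉ b.map Prod.fst) : pvFindV b k = none := by
  induction b with
  | nil => rfl
  | cons p rest ih =>
    simp only [List.map_cons, List.mem_cons, not_or] at h
    rw [pvFindV_cons]
    have : (p.1 == k) = false := by simp [Ne.symm h.1]
    rw [this]
    simpa using ih h.2

theorem get?_mk_eq_pvFindV (b : List (String × String)) (k : String) :
    (PySem.Dict.mk b).get? k = pvFindV b k := by
  induction b with
  | nil => rfl
  | cons p rest ih =>
    rw [PySem.Dict.get?_mk_cons, pvFindV_cons, ih]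

-- B's second pass: patch the second slot of every entry whose key occurs in b,
-- and append (none, vb) for the keys of b not yet present.
theorem pass2_items (b : List (String × String))
    (d : PySem.Dict String (Option String × Option String))
    (hb : (b.map Prod.fst).Nodup) (hd : d.keys.Nodup) :
    (b.foldl (fun d p =>
        if d.contains p.1 then
          d.insert p.1 (((d.get? p.1).getD (none, none)).1, some p.2)
        else
          d.insert p.1 ((none : Option String), some p.2)) d).items
      = d.items.map (pvUpd b)
        ++ (b.filter (fun p => !(d.contains p.1))).map (fun p => (p.1, ((none : Option String), some p.2))) := by
  induction b generalizing d with
  | nil =>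
    simp only [List.foldl_nil, List.filter_nil, List.map_nil, List.append_nil]
    rw [show pvUpd [] = id from funext fun q => rfl, List.map_id]
  | cons p rest ih =>
    simp only [List.map_cons, List.nodup_cons] at hb
    obtain ⟨hp, hrest⟩ := hb
    simp only [List.foldl_cons, List.filter_cons]
    by_cases hc : d.contains p.1 = true
    · rw [if_pos hc]
      have hcontains := hc
      rw [PySem.Dict.contains_iff_mem_keys] at hcontains
      set w : Option String := ((d.get? p.1).getD (none, none)).1 with hw
      have hkeys' : (d.insert p.1 (w, some p.2)).keys = d.keys :=
        PySem.Dict.keys_insert_of_contains _ _ hc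
      rw [ih _ hrest (hkeys' ▸ hd)]
      rw [PySem.Dict.items_insert_of_contains _ _ hc]
      have hcontains' : ∀ q ∈ rest, (d.insert p.1 (w, some p.2)).contains q.1 = d.contains q.1 := by
        intro q hq
        rw [PySem.Dict.contains_insert]
        have hne : (q.1 == p.1) = false := by
          have : q.1 ≠ p.1 := fun h => hp (h ▸ List.mem_map_of_mem hq)
          simpa using this
        simp [hne]
      have hfilt : rest.filter (fun q => !((d.insert p.1 (w, some p.2)).contains q.1))
          = rest.filter (fun q => !(d.contains q.1)) :=
        List.filter_congr (fun q hq => by rw [hcontains' q hq])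
      rw [hfilt]
      have hc' : (!d.contains p.1) = false := by simp [hc]
      rw [hc', List.map_map]
      congr 1
      apply List.map_congr_left
      intro q hq
      by_cases hqp : q.1 = p.1
      · have hq' : (q.1, q.2) ∈ d.items := by simpa using hq
        have hget : d.get? p.1 = some q.2 := by
          rw [← hqp]
          exact PySem.Dict.get?_of_mem_items d hq' hd
        have hbeq : (q.1 == p.1) = true := by simp [hqp]
        simp only [Function.comp, pvUpd, hbeq, if_true, pvFindV_cons]
        rw [pvFindV_eq_none_of_not_mem rest p.1 hp]
        simp [hw, hget, hqp]
      · have hne : (q.1 == p.1) = false := by simpa using hqp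
        simp only [Function.comp, hne, Bool.false_eq_true, if_false]
        simp only [pvUpd, pvFindV_cons]
        have hne' : (p.1 == q.1) = false := by simp [Ne.symm hqp]
        rw [hne']
        simp
    · replace hc : d.contains p.1 = false := by simpa using hc
      simp only [hc, Bool.false_eq_true, if_false, Bool.not_false, if_true]
      have hnotmem : p.1 ∉ d.keys := by
        rw [← PySem.Dict.contains_iff_mem_keys]
        simp [hc]
      have hkeys' : (d.insert p.1 ((none : Option String), some p.2)).keys = d.keys ++ [p.1] :=
        PySem.Dict.keys_insert_of_not_contains _ _ hc
      have hd' : (d.insert p.1 ((none : Option String), some p.2)).keys.Nodup := by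
        rw [hkeys']
        refine hd.append (List.nodup_singleton _) ?_
        intro x hx hx'
        rw [List.mem_singleton] at hx'
        exact hnotmem (hx' ▸ hx)
      rw [ih _ hrest hd']
      rw [PySem.Dict.items_insert_of_not_contains _ _ hc]
      have hcontains' : ∀ q ∈ rest, (d.insert p.1 ((none : Option String), some p.2)).contains q.1 = d.contains q.1 := by
        intro q hq
        rw [PySem.Dict.contains_insert]
        have hne : (q.1 == p.1) = false := by
          have : q.1 ≠ p.1 := fun h => hp (h ▸ List.mem_map_of_mem hq)
          simpa using this
        simp [hne]
      have hfilt : rest.filter (fun q => !((d.insert p.1 ((none : Option String), some p.2)).contains q.1))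
          = rest.filter (fun q => !(d.contains q.1)) :=
        List.filter_congr (fun q hq => by rw [hcontains' q hq])
      rw [hfilt, List.map_append]
      have hmapd : d.items.map (pvUpd rest) = d.items.map (pvUpd (p :: rest)) := by
        apply List.map_congr_left
        intro q hq
        have hqk : q.1 ∈ d.keys := PySem.Dict.mem_keys_of_mem_items _ hq
        have hqp : q.1 ≠ p.1 := fun h => (h ▸ hnotmem) hqk
        simp only [pvUpd, pvFindV_cons]
        have hne' : (p.1 == q.1) = false := by simp [Ne.symm hqp]
        rw [hne']
        simp
      have hnew : [((p.1 : String), ((none : Option String), some p.2))].map (pvUpd rest)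
          = [(p.1, ((none : Option String), some p.2))] := by
        simp only [List.map_cons, List.map_nil, pvUpd]
        rw [pvFindV_eq_none_of_not_mem rest p.1 hp]
      rw [hmapd, hnew, List.append_assoc]
      rfl

-- ===== VERDICT (by name: the statement is the Claim_ definition above) =====
theorem match_sections_py_spec : Claim_equal_match_sections_py := by
  intro a b _ hpre
  obtain ⟨ha, hb⟩ := hpre
  unfold Spec_match_sections_py match_sections_py match_sections_py_alt
  set da := PySem.Dict.mk a with hda
  set db := PySem.Dict.mk b with hdb
  have hkeysa : da.keys = a.map Prod.fst := by simp [hda, PySem.Dict.keys_mk]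
  have hkeysb : db.keys = b.map Prod.fst := by simp [hdb, PySem.Dict.keys_mk]
  -- first pass of B: fresh distinct keys append
  have hpass1 : (a.foldl (fun d p => d.insert p.1 ((some p.2 : Option String), (none : Option String))) PySem.Dict.empty).items
      = a.map (fun p => (p.1, ((some p.2 : Option String), (none : Option String)))) := by
    rw [PySem.Dict.items_foldl_insert_fresh a Prod.fst
      (fun p => ((some p.2 : Option String), (none : Option String))) PySem.Dict.empty
      (fun p _ => PySem.Dict.contains_empty p.1) ha]
    simp [PySem.Dict.empty]
  have hkeys1 : (a.foldl (fun d p => d.insert p.1 ((some p.2 : Option String), (none : Option String))) PySem.Dict.empty).keys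
      = a.map Prod.fst := by
    rw [PySem.Dict.keys_foldl_insert_key a Prod.fst (fun _ p => ((some p.2 : Option String), (none : Option String))) PySem.Dict.empty]
    simp [PySem.Dict.keys_empty, PySem.Set.update_nil_left, PySem.Set.ofList_eq_self_of_nodup _ ha]
  have hcont1 : ∀ k, (a.foldl (fun d p => d.insert p.1 ((some p.2 : Option String), (none : Option String))) PySem.Dict.empty).contains k
      = decide (k ∈ a.map Prod.fst) := by
    intro k
    rw [PySem.Dict.contains_eq_decide_mem_keys, hkeys1]
  -- B's whole result
  rw [pass2_items b _ hb (by rw [hkeys1]; exact ha), hpass1, List.map_map]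
  -- A side: dedup of concatenation
  rw [PySem.List.dedup_eq_ofList, PySem.Set.ofList_append,
      PySem.Set.ofList_eq_self_of_nodup _ ha, PySem.Set.update_eq_append_filter,
      PySem.Set.ofList_eq_self_of_nodup _ hb, List.map_append]
  congr 1
  · -- entries from a
    rw [List.map_map]
    apply List.map_congr_left
    intro p hp
    have hga : da.get? p.1 = some p.2 := by
      apply PySem.Dict.get?_of_mem_items
      · simpa [hda] using hp
      · rw [hkeysa]; exact ha
    have hgb : db.get? p.1 = pvFindV b p.1 := by rw [hdb]; exact get?_mk_eq_pvFindV b p.1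
    simp only [Function.comp, pvUpd, hga, hgb]
    cases pvFindV b p.1 <;> rfl
  · -- entries from b only
    have hfilt : (b.map Prod.fst).filter (fun y => !(PySem.Set.contains (α := String) (a.map Prod.fst) y))
        = (b.filter (fun p => !(PySem.Set.contains (α := String) (a.map Prod.fst) p.1))).map Prod.fst := by
      rw [List.filter_map]
      rfl
    rw [hfilt, List.map_map]
    have hfilt2 : (b.filter (fun p => !((a.foldl (fun d p => d.insert p.1 ((some p.2 : Option String), (none : Option String))) PySem.Dict.empty).contains p.1)))
        = b.filter (fun p => !(PySem.Set.contains (α := String) (a.map Prod.fst) p.1)) := by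
      apply List.filter_congr
      intro q _
      rw [hcont1]
      simp [PySem.Set.contains]
    rw [hfilt2]
    apply List.map_congr_left
    intro p hp
    rw [List.mem_filter] at hp
    obtain ⟨hpb, hpn⟩ := hp
    have hnotina : p.1 ∉ a.map Prod.fst := by
      simpa [PySem.Set.contains] using hpn
    have hga : da.get? p.1 = none := by
      rw [PySem.Dict.get?_eq_none_iff_not_mem_keys, hkeysa]; exact hnotina
    have hgb : db.get? p.1 = some p.2 := by
      apply PySem.Dict.get?_of_mem_items
      · simpa [hdb] using hpb
      · rw [hkeysb]; exact hb
    simp [hga, hgb]
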